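-- pv_equiv track=rewrite | github.com/vgandhi1/FreeCodeCamp-daily_challenges | Nov25/Nov_01_2025_sign_validator.py | verify_signature
-- ===== SOURCE A (Python) =====
-- def verify_signature(message, key, signature):
--     """
--     Verifies a signature by summing the character values of a message and a key.
--     """
--
--     def calculate_string_sum(text_string):
--         """
--         Calculates the total value of a string based on the defined rules:
--         a-z: 1-26
--         A-Z: 27-52
--         Other: 0
--         """
--         total_sum = 0
--         for char in text_string:
--             if 'a' <= char <= 'z':
--                 # a-z map to 1-26
--                 total_sum += ord(char) - ord('a') + 1
--             elif 'A' <= char <= 'Z':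
--                 # A-Z map to 27-52
--                 total_sum += ord(char) - ord('A') + 27
--             # Non-alphabetic characters add 0, so we can just ignore them
--
--         return total_sum
--
--     # Calculate the sum for the message and the key
--     computed_signature = calculate_string_sum(message) + calculate_string_sum(key)
--
--     # Compare with the provided signature
--     return computed_signature == signature
-- ===== SOURCE B (Python) =====
-- def verify_signature(message, key, signature):
--     # Tally-first: build a character frequency table once, then weight each
--     # distinct character by its value times its count.
--     counts = {}
--     for ch in message + key:
--         counts[ch] = counts.get(ch, 0) + 1
--     total = 0
--     for ch, n in counts.items():
--         if 'a' <= ch <= 'z':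
--             total += n * (ord(ch) - 96)
--         elif 'A' <= ch <= 'Z':
--             total += n * (ord(ch) - 38)
--     return total == signature
-- ===== Notes on version B (the rewrite author's own statement) =====
-- stated objective: alternative
-- what changed: Replaces A's two per-character summation loops with a tally-first scheme: one pass builds a character-frequency dict over message+key, then the total is computed as count*value over the distinct characters.
import Mathlib
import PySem

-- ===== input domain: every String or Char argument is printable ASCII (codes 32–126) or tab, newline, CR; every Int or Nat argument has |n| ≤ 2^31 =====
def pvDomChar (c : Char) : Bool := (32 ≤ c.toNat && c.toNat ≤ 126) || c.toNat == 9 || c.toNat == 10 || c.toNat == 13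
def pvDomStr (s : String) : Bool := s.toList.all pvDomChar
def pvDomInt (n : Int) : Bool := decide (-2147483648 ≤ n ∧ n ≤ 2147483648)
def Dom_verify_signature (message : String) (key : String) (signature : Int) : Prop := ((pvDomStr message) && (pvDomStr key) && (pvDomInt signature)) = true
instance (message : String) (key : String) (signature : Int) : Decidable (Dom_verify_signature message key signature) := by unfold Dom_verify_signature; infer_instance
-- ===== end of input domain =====

-- B replaces A's two per-character summation loops by a tally-first scheme: one frequency
-- dict over message+key, then count*value over the distinct characters (objective: alternative).

-- ===== PORT A =====
-- A's nested helper calculate_string_sum, on the character list of the string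
def pvCalcSum (cs : List Char) : Int :=
  cs.foldl (fun acc c =>
    if 'a' ≤ c ∧ c ≤ 'z' then acc + ((c.toNat : Int) - ('a'.toNat : Int) + 1)
    else if 'A' ≤ c ∧ c ≤ 'Z' then acc + ((c.toNat : Int) - ('A'.toNat : Int) + 27)
    else acc) 0

def verify_signature (message : String) (key : String) (signature : Int) : Bool :=
  decide (pvCalcSum message.toList + pvCalcSum key.toList = signature)

-- ===== PORT B =====
def verify_signature_alt (message : String) (key : String) (signature : Int) : Bool :=
  let counts := (message.toList ++ key.toList).foldl
    (fun d c => d.insert c (d.getD c 0 + 1)) PySem.Dict.empty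
  let total := counts.items.foldl (fun acc p =>
    if 'a' ≤ p.1 ∧ p.1 ≤ 'z' then acc + p.2 * ((p.1.toNat : Int) - 96)
    else if 'A' ≤ p.1 ∧ p.1 ≤ 'Z' then acc + p.2 * ((p.1.toNat : Int) - 38)
    else acc) 0
  decide (total = signature)

-- ===== PRECONDITION & SPEC =====
def Spec_verify_signature (message : String) (key : String) (signature : Int) (out : Bool) : Prop := out = verify_signature_alt message key signature
instance (message : String) (key : String) (signature : Int) (out : Bool) : Decidable (Spec_verify_signature message key signature out) := by unfold Spec_verify_signature; infer_instance

-- ===== CLAIM (what is proved, stated in full; the proofs are below) =====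
def Claim_equal_verify_signature : Prop := ∀ (message : String) (key : String) (signature : Int), Dom_verify_signature message key signature → Spec_verify_signature message key signature (verify_signature message key signature)

-- ===== LEMMAS AND PROOFS =====

-- the per-character value both programs assign
def pvVal (c : Char) : Int :=
  if 'a' ≤ c ∧ c ≤ 'z' then (c.toNat : Int) - 96
  else if 'A' ≤ c ∧ c ≤ 'Z' then (c.toNat : Int) - 38
  else 0

theorem pvCalcSum_eq (cs : List Char) : pvCalcSum cs = (cs.map pvVal).sum := by
  suffices h : ∀ (l : List Char) (acc : Int),
      l.foldl (fun acc c =>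
        if 'a' ≤ c ∧ c ≤ 'z' then acc + ((c.toNat : Int) - ('a'.toNat : Int) + 1)
        else if 'A' ≤ c ∧ c ≤ 'Z' then acc + ((c.toNat : Int) - ('A'.toNat : Int) + 27)
        else acc) acc = acc + (l.map pvVal).sum by
    simpa using h cs 0
  intro l
  induction l with
  | nil => simp
  | cons c t ih =>
    intro acc
    rw [List.foldl_cons, ih, List.map_cons, List.sum_cons]
    unfold pvVal
    split_ifs <;>
      (try simp only [show ('a'.toNat : Int) = 97 from rfl,
        show ('A'.toNat : Int) = 65 from rfl]) <;> ring

theorem pvItemsFold_eq (ps : List (Char × Int)) (acc : Int) :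
    ps.foldl (fun acc p =>
      if 'a' ≤ p.1 ∧ p.1 ≤ 'z' then acc + p.2 * ((p.1.toNat : Int) - 96)
      else if 'A' ≤ p.1 ∧ p.1 ≤ 'Z' then acc + p.2 * ((p.1.toNat : Int) - 38)
      else acc) acc = acc + (ps.map (fun p => p.2 * pvVal p.1)).sum := by
  induction ps generalizing acc with
  | nil => simp
  | cons p t ih =>
    simp only [List.foldl_cons, List.map_cons, List.sum_cons, ih, pvVal]
    split_ifs <;> ring

-- a single indicator sum over a duplicate-free key list
theorem pvIndicator_sum (ks : List Char) (hnd : ks.Nodup) (c : Char) (hc : c ∈ ks) :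
    (ks.map (fun k => if k = c then pvVal k else 0)).sum = pvVal c := by
  induction ks with
  | nil => cases hc
  | cons a t ih =>
    simp only [List.nodup_cons] at hnd
    rcases List.mem_cons.mp hc with h | h
    · subst h
      have hz : (t.map (fun x => if x = c then pvVal x else 0)).sum = 0 := by
        apply List.sum_eq_zero
        intro x hx
        rcases List.mem_map.mp hx with ⟨y, hy, rfl⟩
        have hne : y ≠ c := fun e => hnd.1 (e ▸ hy)
        simp [hne]
      simp [hz]
    · have hne : a ≠ c := fun e => hnd.1 (e ▸ h)
      simp [hne, ih hnd.2 h]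

-- weighted sum over distinct keys equals per-occurrence sum
theorem pvWeighted_sum (l ks : List Char) (hnd : ks.Nodup) (hsub : ∀ x ∈ l, x ∈ ks) :
    (ks.map (fun k => (l.count k : Int) * pvVal k)).sum = (l.map pvVal).sum := by
  induction l with
  | nil => simp
  | cons c t ih =>
    have step : (ks.map (fun k => ((c :: t).count k : Int) * pvVal k)).sum
        = (ks.map (fun k => (t.count k : Int) * pvVal k)).sum
          + (ks.map (fun k => if k = c then pvVal k else 0)).sum := by
      rw [← List.sum_map_add]
      apply congrArg
      apply List.map_congr_left
      intro k _
      by_cases h : k = c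
      · subst h
        simp
        ring
      · have h' : ¬(c = k) := fun e => h e.symm
        simp [h, h']
    rw [step, pvIndicator_sum ks hnd c (hsub c (List.mem_cons_self)),
        ih (fun x hx => hsub x (List.mem_cons_of_mem _ hx))]
    simp [add_comm]

-- ===== VERDICT (by name: the statement is the Claim_ definition above) =====
theorem verify_signature_spec : Claim_equal_verify_signature := by
  intro message key signature _
  unfold Spec_verify_signature
  simp only [verify_signature, verify_signature_alt]
  rw [PySem.Dict.foldl_insert_getD_add_one_eq_counter, pvItemsFold_eq,
      PySem.Dict.items_counter, List.map_map]
  have hw := pvWeighted_sum (message.toList ++ key.toList)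
      (PySem.Set.ofList (message.toList ++ key.toList))
      (PySem.Set.nodup_ofList _)
      (fun x hx => (PySem.Set.mem_ofList _ _).mpr hx)
  simp only [Function.comp_def] at hw ⊢
  simp only [hw, zero_add, List.map_append, List.sum_append, pvCalcSum_eq]
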